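-- pv_equiv track=rewrite | github.com/PigeonOfPrison/space-cargo-stowage-project | backend/engines/optimizers/container_optimizer.py | _zones_compatible
-- ===== SOURCE A (Python) =====
-- def _zones_compatible(zone1: str, zone2: str) -> bool:
--     """Check if two zones are compatible for cross-placement"""
--     compatible_groups = [
--         ['Medical_Bay', 'Life_Support'],
--         ['Command_Center', 'Cockpit'],
--         ['Engineering_Bay', 'Maintenance_Bay', 'Power_Bay'],
--         ['Storage_Bay', 'External_Storage'],
--         ['Crew_Quarters', 'Sanitation_Bay'],
--         ['Lab', 'Greenhouse']
--     ]
--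
--     for group in compatible_groups:
--         if zone1 in group and zone2 in group:
--             return True
--
--     return False
-- ===== SOURCE B (Python) =====
-- _GROUPS = [
--     ['Medical_Bay', 'Life_Support'],
--     ['Command_Center', 'Cockpit'],
--     ['Engineering_Bay', 'Maintenance_Bay', 'Power_Bay'],
--     ['Storage_Bay', 'External_Storage'],
--     ['Crew_Quarters', 'Sanitation_Bay'],
--     ['Lab', 'Greenhouse']
-- ]
--
-- _ZONE_GROUP = {zone: i for i, group in enumerate(_GROUPS) for zone in group}
--
--
-- def _zones_compatible(zone1: str, zone2: str) -> bool:
--     """Check if two zones are compatible for cross-placement"""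
--     g = _ZONE_GROUP.get(zone1)
--     return g is not None and _ZONE_GROUP.get(zone2) == g
-- ===== Notes on version B (the rewrite author's own statement) =====
-- stated objective: idiomatic
-- what changed: Replaces the per-call loop over group lists with a module-level zone-to-group-index dict built once; the body becomes two O(1) lookups compared for equality.
import Mathlib
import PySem

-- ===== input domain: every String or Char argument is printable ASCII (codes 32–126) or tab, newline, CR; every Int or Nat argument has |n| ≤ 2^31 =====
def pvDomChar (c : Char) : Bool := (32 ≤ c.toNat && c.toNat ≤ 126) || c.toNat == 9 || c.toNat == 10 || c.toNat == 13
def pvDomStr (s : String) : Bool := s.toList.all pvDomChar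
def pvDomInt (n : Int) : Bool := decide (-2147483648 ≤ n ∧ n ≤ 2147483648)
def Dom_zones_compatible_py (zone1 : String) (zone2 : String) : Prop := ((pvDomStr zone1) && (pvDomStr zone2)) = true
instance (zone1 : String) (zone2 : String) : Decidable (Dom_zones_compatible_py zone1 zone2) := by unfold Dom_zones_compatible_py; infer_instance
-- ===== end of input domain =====

-- B replaces A's per-call scan over the group lists with a zone -> group-index table
-- built once and two lookups (idiomatic; same observable behaviour).


-- ===== PORT A =====
def pvCompatibleGroups : List (List String) :=
  [ ["Medical_Bay", "Life_Support"],
    ["Command_Center", "Cockpit"],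
    ["Engineering_Bay", "Maintenance_Bay", "Power_Bay"],
    ["Storage_Bay", "External_Storage"],
    ["Crew_Quarters", "Sanitation_Bay"],
    ["Lab", "Greenhouse"] ]

-- A's 'for group in compatible_groups: … return True / return False' loop
def pvLoopA (zone1 zone2 : String) : List (List String) → Bool
  | [] => false
  | g :: rest => if g.contains zone1 && g.contains zone2 then true else pvLoopA zone1 zone2 rest

def zones_compatible_py (zone1 : String) (zone2 : String) : Bool :=
  pvLoopA zone1 zone2 pvCompatibleGroups

-- ===== PORT B =====
-- module-level table: {zone: i for i, group in enumerate(_GROUPS) for zone in group}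
def pvZoneGroup : PySem.Dict String Int :=
  (PySem.List.enumerate pvCompatibleGroups).foldl
    (fun d p => p.2.foldl (fun d z => d.insert z p.1) d) PySem.Dict.empty

-- g = _ZONE_GROUP.get(zone1); return g is not None and _ZONE_GROUP.get(zone2) == g
def zones_compatible_py_alt (zone1 : String) (zone2 : String) : Bool :=
  let g := pvZoneGroup.get? zone1
  g.isSome && (pvZoneGroup.get? zone2 == g)

-- ===== PRECONDITION & SPEC =====
def Spec_zones_compatible_py (zone1 : String) (zone2 : String) (out : Bool) : Prop := out = zones_compatible_py_alt zone1 zone2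
instance (zone1 : String) (zone2 : String) (out : Bool) : Decidable (Spec_zones_compatible_py zone1 zone2 out) := by unfold Spec_zones_compatible_py; infer_instance

-- ===== CLAIM (what is proved, stated in full; the proofs are below) =====
def Claim_equal_zones_compatible_py : Prop := ∀ (zone1 : String) (zone2 : String), Dom_zones_compatible_py zone1 zone2 → Spec_zones_compatible_py zone1 zone2 (zones_compatible_py zone1 zone2)

-- ===== LEMMAS AND PROOFS =====

-- index (as Int, starting at s) of the first group containing z
def pvFindIdx? (z : String) : List (List String) → Int → Option Int
  | [], _ => none
  | g :: rest, s => if g.contains z then some s else pvFindIdx? z rest (s + 1)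

theorem pvInsertAll_get? (g : List String) (i : Int) (d : PySem.Dict String Int) (z : String) :
    (g.foldl (fun d z' => d.insert z' i) d).get? z
      = if g.contains z then some i else d.get? z := by
  induction g generalizing d with
  | nil => simp
  | cons x g' ih =>
      simp only [List.foldl_cons, ih, List.contains_cons, PySem.Dict.get?_insert]
      by_cases hx : z = x <;> by_cases hg : g'.contains z <;> simp_all

theorem pvFind_none (z : String) (G : List (List String)) (s : Int)
    (h : z ∉ G.flatten) : pvFindIdx? z G s = none := by
  induction G generalizing s with
  | nil => rfl
  | cons g rest ih =>
      simp only [List.flatten_cons, List.mem_append, not_or] at h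
      simp only [pvFindIdx?]
      rw [if_neg (by simpa using h.1), ih (s + 1) h.2]

theorem pvFind_ge (z : String) (G : List (List String)) (s j : Int)
    (h : pvFindIdx? z G s = some j) : s ≤ j := by
  induction G generalizing s with
  | nil => simp [pvFindIdx?] at h
  | cons g rest ih =>
      simp only [pvFindIdx?] at h
      split at h
      · injection h with h'; omega
      · have := ih (s + 1) h; omega

theorem pvFind_ne (z : String) (G : List (List String)) (s : Int) :
    (pvFindIdx? z G (s + 1) == some s) = false := by
  cases h : pvFindIdx? z G (s + 1) with
  | none => rfl
  | some j =>
      have := pvFind_ge z G (s + 1) j h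
      simp only [beq_eq_false_iff_ne, ne_eq, Option.some.injEq]
      omega

theorem pvLoop_false_left (z1 z2 : String) (G : List (List String))
    (h : z1 ∉ G.flatten) : pvLoopA z1 z2 G = false := by
  induction G with
  | nil => rfl
  | cons g rest ih =>
      simp only [List.flatten_cons, List.mem_append, not_or] at h
      simp only [pvLoopA]
      rw [if_neg (by simp [h.1]), ih h.2]

theorem pvLoop_false_right (z1 z2 : String) (G : List (List String))
    (h : z2 ∉ G.flatten) : pvLoopA z1 z2 G = false := by
  induction G with
  | nil => rfl
  | cons g rest ih =>
      simp only [List.flatten_cons, List.mem_append, not_or] at h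
      simp only [pvLoopA]
      rw [if_neg (by simp [h.1]), ih h.2]

theorem pvBuild_get? (G : List (List String)) (s : Int) (d : PySem.Dict String Int)
    (z : String) (hnd : G.flatten.Nodup) :
    ((PySem.List.enumerate G s).foldl
        (fun d p => p.2.foldl (fun d z => d.insert z p.1) d) d).get? z
      = match pvFindIdx? z G s with
        | some i => some i
        | none => d.get? z := by
  induction G generalizing s d with
  | nil => rfl
  | cons g rest ih =>
      simp only [List.flatten_cons, List.nodup_append] at hnd
      rw [PySem.List.enumerate_cons, List.foldl_cons,
        ih (s + 1) _ hnd.2.1]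
      by_cases hc : g.contains z
      · have hz : z ∈ g := by simpa using hc
        have hnot : z ∉ rest.flatten := fun hm => hnd.2.2 z hz z hm rfl
        rw [pvFind_none z rest (s + 1) hnot]
        simp only [pvFindIdx?, if_pos hc, pvInsertAll_get?]
      · simp only [pvFindIdx?, if_neg hc]
        cases h : pvFindIdx? z rest (s + 1) with
        | some i => rfl
        | none => simp only [pvInsertAll_get?, if_neg hc]

theorem pvLoop_eq (G : List (List String)) (s : Int) (z1 z2 : String)
    (hnd : G.flatten.Nodup) :
    pvLoopA z1 z2 G
      = ((pvFindIdx? z1 G s).isSome && (pvFindIdx? z2 G s == pvFindIdx? z1 G s)) := by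
  induction G generalizing s with
  | nil => rfl
  | cons g rest ih =>
      simp only [List.flatten_cons, List.nodup_append] at hnd
      simp only [pvLoopA, pvFindIdx?]
      by_cases h1 : z1 ∈ g <;> by_cases h2 : z2 ∈ g
      · simp [h1, h2]
      · have hnot : z1 ∉ rest.flatten := fun hm => hnd.2.2 z1 h1 z1 hm rfl
        rw [if_neg (by simp [h2]), pvLoop_false_left z1 z2 rest hnot]
        simp [h1, h2, pvFind_ne z2 rest s]
      · have hnot : z2 ∉ rest.flatten := fun hm => hnd.2.2 z2 h2 z2 hm rfl
        rw [if_neg (by simp [h1]), pvLoop_false_right z1 z2 rest hnot]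
        cases hf : pvFindIdx? z1 rest (s + 1) with
        | none => simp [h1, h2]
        | some j =>
            have hge := pvFind_ge z1 rest (s + 1) j hf
            simp [h1, h2]
            omega
      · rw [if_neg (by simp [h1]), ih (s + 1) hnd.2.1]
        simp [h1, h2]

theorem pvNodup : pvCompatibleGroups.flatten.Nodup := by decide

theorem pvZoneGroup_get? (z : String) :
    pvZoneGroup.get? z = pvFindIdx? z pvCompatibleGroups 0 := by
  rw [pvZoneGroup, pvBuild_get? pvCompatibleGroups 0 PySem.Dict.empty z pvNodup]
  cases pvFindIdx? z pvCompatibleGroups 0 with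
  | none => simp [PySem.Dict.get?_empty]
  | some i => rfl

-- ===== VERDICT (by name: the statement is the Claim_ definition above) =====
theorem zones_compatible_py_spec : Claim_equal_zones_compatible_py := by
  intro zone1 zone2 _
  show zones_compatible_py zone1 zone2 = zones_compatible_py_alt zone1 zone2
  unfold zones_compatible_py zones_compatible_py_alt
  rw [pvZoneGroup_get?, pvZoneGroup_get?]
  exact pvLoop_eq pvCompatibleGroups 0 zone1 zone2 pvNodup
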